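-- pv_equiv track=rewrite | github.com/Brian-RG/CYK | cyk.py | checklet
-- ===== SOURCE A (Python) =====
-- grammar={"S":["AB","BC"],"A":["AB","a"],"B":["CC","b"],"C":["AB","a"]}
--
-- def checklet(c):
--     aux=set()
--     for e in grammar.keys():
--         if c in grammar[e]:
--             aux.add(e)
--     if(len(aux)):
--         return aux
--     else:
--         return None
-- ===== SOURCE B (Python) =====
-- grammar={"S":["AB","BC"],"A":["AB","a"],"B":["CC","b"],"C":["AB","a"]}
--
-- # reverse index production -> set of nonterminals, built once at module load
-- _rev = {}
-- for _e in grammar: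
--     for _p in grammar[_e]:
--         _rev.setdefault(_p, set()).add(_e)
--
-- def checklet(c):
--     s = _rev.get(c)
--     if s is None:
--         return None
--     return set(s)
-- ===== Notes on version B (the rewrite author's own statement) =====
-- stated objective: simpler
-- what changed: Replaces the per-call scan over all grammar keys with a reverse index (production -> set of nonterminals) built once at module load, so checklet is a single dictionary lookup returning a copy of the indexed set.
import Mathlib
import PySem

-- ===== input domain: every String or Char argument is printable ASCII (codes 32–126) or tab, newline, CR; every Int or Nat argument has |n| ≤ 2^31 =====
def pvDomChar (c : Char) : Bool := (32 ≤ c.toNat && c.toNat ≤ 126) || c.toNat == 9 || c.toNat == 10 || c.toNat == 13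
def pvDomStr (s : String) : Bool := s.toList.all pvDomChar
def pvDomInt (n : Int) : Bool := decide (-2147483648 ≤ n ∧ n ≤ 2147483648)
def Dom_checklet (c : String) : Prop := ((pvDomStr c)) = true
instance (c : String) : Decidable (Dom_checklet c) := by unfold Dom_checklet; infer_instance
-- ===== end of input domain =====

-- B replaces A's per-call scan over all grammar keys by a one-time reverse index and a single lookup (simpler per-call control flow).


-- ===== PORT A =====
def grammarA : PySem.Dict String (List String) :=
  PySem.Dict.ofList [("S", ["AB", "BC"]), ("A", ["AB", "a"]), ("B", ["CC", "b"]), ("C", ["AB", "a"])]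

def checklet (c : String) : Option (List String) :=
  let aux : PySem.Set String :=
    grammarA.keys.foldl
      (fun aux e => if c ∈ grammarA.getD e [] then PySem.Set.add aux e else aux)
      PySem.Set.empty
  if PySem.Set.len aux ≠ 0 then some aux else none

-- ===== PORT B =====
def grammarB : PySem.Dict String (List String) :=
  PySem.Dict.ofList [("S", ["AB", "BC"]), ("A", ["AB", "a"]), ("B", ["CC", "b"]), ("C", ["AB", "a"])]

-- module-level loop building the reverse index _rev
def revB : PySem.Dict String (PySem.Set String) :=
  grammarB.keys.foldl
    (fun r e =>
      (grammarB.getD e []).foldl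
        (fun r p => r.insert p (PySem.Set.add (r.getD p PySem.Set.empty) e)) r)
    PySem.Dict.empty

def checklet_alt (c : String) : Option (List String) :=
  match revB.get? c with
  | none => none
  | some s => some (PySem.Set.ofList s)

-- ===== PRECONDITION & SPEC =====
def Spec_checklet (c : String) (out : Option (List String)) : Prop := out = checklet_alt c
instance (c : String) (out : Option (List String)) : Decidable (Spec_checklet c out) := by unfold Spec_checklet; infer_instance

-- ===== CLAIM (what is proved, stated in full; the proofs are below) =====
def Claim_equal_checklet : Prop := ∀ (c : String), Dom_checklet c → Spec_checklet c (checklet c)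

-- ===== LEMMAS AND PROOFS =====

-- ===== VERDICT (by name: the statement is the Claim_ definition above) =====
theorem checklet_spec : Claim_equal_checklet := by
  intro c _
  unfold Spec_checklet
  by_cases h1 : c = "AB"
  · subst h1; decide
  by_cases h2 : c = "BC"
  · subst h2; decide
  by_cases h3 : c = "a"
  · subst h3; decide
  by_cases h4 : c = "CC"
  · subst h4; decide
  by_cases h5 : c = "b"
  · subst h5; decide
  have n1 : ("AB" == c) = false := by simp; exact fun h => h1 h.symm
  have n2 : ("BC" == c) = false := by simp; exact fun h => h2 h.symm
  have n3 : ("a" == c) = false := by simp; exact fun h => h3 h.symm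
  have n4 : ("CC" == c) = false := by simp; exact fun h => h4 h.symm
  have n5 : ("b" == c) = false := by simp; exact fun h => h5 h.symm
  simp [checklet, checklet_alt, revB, grammarA, grammarB,
    PySem.Dict.ofList, PySem.Dict.empty, PySem.Dict.keys, PySem.Dict.getD,
    PySem.Dict.get?, PySem.Dict.insert, PySem.Dict.contains, PySem.Dict.update,
    List.foldl, List.find?, List.map,
    PySem.Set.add, PySem.Set.len, PySem.Set.empty,
    h1, h2, h3, h4, h5, n1, n2, n3, n4, n5]
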